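-- pv_equiv track=rewrite | github.com/pypi-data/pypi-mirror-392 | packages/byte-ai-cli/byte_ai_cli-0.3.0-py3-none-any.whl/byte/domain/files/service/watcher_service.py | _extract_comment_lines
-- ===== SOURCE A (Python) =====
-- from typing import List, Optional, Set
--
-- def _extract_comment_lines(content: str) -> List[str]:
--     """Extract comment blocks from content.
--
--     A comment block is one or more consecutive lines starting with a comment marker.
--     Returns list of (starting_line_number, combined_comment_text) tuples.
--     """
--     comment_blocks = []
--
--     # Common single-line comment patterns across languages
--     single_line_markers = ["#", "//", "--", ";", "%"]
--
--     current_block = []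
--
--     for i, line in enumerate(content.splitlines(), 1):
--         stripped_line = line.strip()
--
--         # Check if line starts with any comment marker
--         is_comment = any(stripped_line.startswith(marker) for marker in single_line_markers)
--
--         if is_comment:
--             # Start or continue a comment block
--             current_block.append(stripped_line)
--         else:
--             # Non-comment line - end current block if one exists
--             if current_block:
--                 combined_text = "\n".join(current_block)
--                 comment_blocks.append(combined_text)
--                 current_block = []
--
--     # Don't forget the last block if file ends with comments
--     if current_block:
--         combined_text = "\n".join(current_block)
--         comment_blocks.append(combined_text)
--
--     return comment_blocks
-- ===== SOURCE B (Python) =====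
-- from typing import List
--
--
-- def _extract_comment_lines(content: str) -> List[str]:
--     """Two-pointer scan: strip all lines once, then for each comment line
--     found, advance a second index past the whole consecutive run and join
--     that slice in one step (no running accumulator, no end-of-loop flush)."""
--     markers = ("#", "//", "--", ";", "%")
--     lines = [ln.strip() for ln in content.splitlines()]
--     n = len(lines)
--     blocks = []
--     i = 0
--     while i < n:
--         if lines[i].startswith(markers):
--             j = i + 1
--             while j < n and lines[j].startswith(markers):
--                 j += 1
--             blocks.append("\n".join(lines[i:j]))
--             i = j
--         else:
--             i += 1
--     return blocks
-- ===== Notes on version B (the rewrite author's own statement) =====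
-- stated objective: alternative
-- what changed: Replaces the running current_block accumulator with end-of-loop flush by a two-pointer scan over pre-stripped lines: on hitting a comment line it advances a second index past the whole consecutive run and joins that slice in one step.
import Mathlib
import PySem

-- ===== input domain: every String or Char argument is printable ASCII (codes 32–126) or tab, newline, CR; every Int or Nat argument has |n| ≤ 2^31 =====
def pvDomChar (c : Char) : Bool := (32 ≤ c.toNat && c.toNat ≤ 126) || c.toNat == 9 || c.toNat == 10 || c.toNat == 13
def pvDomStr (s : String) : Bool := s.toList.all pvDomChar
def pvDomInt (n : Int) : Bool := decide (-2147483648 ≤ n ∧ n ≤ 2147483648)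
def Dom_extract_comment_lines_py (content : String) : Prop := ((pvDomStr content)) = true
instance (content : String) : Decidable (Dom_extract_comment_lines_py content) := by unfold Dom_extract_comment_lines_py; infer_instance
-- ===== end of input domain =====

-- B is an alternative, equally fast implementation: a two-pointer scan over pre-stripped
-- lines replaces A's running current_block accumulator and end-of-loop flush.

-- ===== PORT A =====
-- is_comment = any(stripped_line.startswith(marker) for marker in single_line_markers)
def pvIsComment (s : String) : Bool :=
  ["#", "//", "--", ";", "%"].any fun m => PySem.Str.startswith s m

-- the body of A's for-loop, acting on state (comment_blocks, current_block)
def pvStepA (st : List String × List String) (line : String) : List String × List String :=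
  let stripped := PySem.Str.strip line
  if pvIsComment stripped then (st.1, st.2 ++ [stripped])
  else if st.2.isEmpty then st else (st.1 ++ [PySem.Str.join "\n" st.2], [])

def extract_comment_lines_py (content : String) : List String :=
  let fin := (PySem.Str.splitlines content).foldl pvStepA ([], [])
  -- final flush: if current_block: comment_blocks.append("\n".join(current_block))
  if fin.2.isEmpty then fin.1 else fin.1 ++ [PySem.Str.join "\n" fin.2]

-- ===== PORT B =====
-- lines[i].startswith(markers) with markers = ("#", "//", "--", ";", "%")
def pvIsCommentB (s : String) : Bool :=
  ["#", "//", "--", ";", "%"].any fun m => PySem.Str.startswith s m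

-- inner while: j advances past the consecutive comment run
def pvScanB (lines : List String) (n j : Nat) : Nat :=
  if j < n ∧ pvIsCommentB (lines.getD j "") then pvScanB lines n (j + 1) else j
termination_by n - j
decreasing_by omega

-- termination fact for the outer loop: the inner scan never moves j backwards
theorem pvScanB_ge (lines : List String) (n j : Nat) : j ≤ pvScanB lines n j := by
  fun_induction pvScanB with
  | case1 _ _ ih => omega
  | case2 => exact le_refl _

-- outer while over index i, emitting one joined slice per comment run
def pvLoopB (lines : List String) (n i : Nat) : List String :=
  if h : i < n then
    if pvIsCommentB (lines.getD i "") then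
      let j := pvScanB lines n (i + 1)
      have _hj : i + 1 ≤ pvScanB lines n (i + 1) := pvScanB_ge lines n (i + 1)
      PySem.Str.join "\n" (PySem.List.slice lines (some (i : Int)) (some (j : Int)))
        :: pvLoopB lines n j
    else pvLoopB lines n (i + 1)
  else []
termination_by n - i
decreasing_by all_goals omega

def extract_comment_lines_py_alt (content : String) : List String :=
  let lines := (PySem.Str.splitlines content).map PySem.Str.strip
  pvLoopB lines lines.length 0

-- ===== PRECONDITION & SPEC =====
def Spec_extract_comment_lines_py (content : String) (out : List String) : Prop := out = extract_comment_lines_py_alt content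
instance (content : String) (out : List String) : Decidable (Spec_extract_comment_lines_py content out) := by unfold Spec_extract_comment_lines_py; infer_instance

-- ===== CLAIM (what is proved, stated in full; the proofs are below) =====
def Claim_equal_extract_comment_lines_py : Prop := ∀ (content : String), Dom_extract_comment_lines_py content → Spec_extract_comment_lines_py content (extract_comment_lines_py content)

-- ===== LEMMAS AND PROOFS =====

-- canonical recursive description of both programs, on the list of stripped lines
def pvSpec : List String → List String
  | [] => []
  | s :: rest =>
    if pvIsComment s then
      PySem.Str.join "\n" (s :: rest.takeWhile pvIsComment)
        :: pvSpec (rest.dropWhile pvIsComment)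
    else pvSpec rest
termination_by l => l.length
decreasing_by
  · exact Nat.lt_succ_of_le (List.length_dropWhile_le _ _)
  · exact Nat.lt_succ_of_le (le_refl _)

-- A's loop body on an already-stripped line, and the end-of-loop flush
def pvStepS (st : List String × List String) (s : String) : List String × List String :=
  if pvIsComment s then (st.1, st.2 ++ [s])
  else if st.2.isEmpty then st else (st.1 ++ [PySem.Str.join "\n" st.2], [])

def pvFlush (st : List String × List String) : List String :=
  if st.2.isEmpty then st.1 else st.1 ++ [PySem.Str.join "\n" st.2]

theorem pvA_fold (ls blocks cur : List String) :
    pvFlush (ls.foldl pvStepS (blocks, cur))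
    = blocks ++
      (if cur.isEmpty then pvSpec ls
       else PySem.Str.join "\n" (cur ++ ls.takeWhile pvIsComment)
              :: pvSpec (ls.dropWhile pvIsComment)) := by
  induction ls generalizing blocks cur with
  | nil =>
    by_cases hc : cur.isEmpty <;>
      simp_all [List.isEmpty_iff, pvSpec, pvFlush]
  | cons s rest ih =>
    rw [List.foldl_cons]
    by_cases hs : pvIsComment s
    · rw [show pvStepS (blocks, cur) s = (blocks, cur ++ [s]) from by simp [pvStepS, hs]]
      rw [ih]
      by_cases hc : cur.isEmpty
      · rw [List.isEmpty_iff] at hc; subst hc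
        simp [pvSpec, hs]
      · simp only [Bool.not_eq_true, List.isEmpty_eq_false_iff] at hc
        simp [hs, hc, List.append_assoc]
    · by_cases hc : cur.isEmpty
      · rw [List.isEmpty_iff] at hc; subst hc
        rw [show pvStepS (blocks, ([] : List String)) s = (blocks, []) from by
          simp [pvStepS, hs]]
        rw [ih]
        simp [pvSpec, hs]
      · rw [show pvStepS (blocks, cur) s
            = (blocks ++ [PySem.Str.join "\n" cur], []) from by simp [pvStepS, hs, hc]]
        rw [ih]
        simp only [Bool.not_eq_true, List.isEmpty_eq_false_iff] at hc
        simp [hs, hc, pvSpec]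

theorem pvTake_takeWhile {α : Type} (l : List α) (p : α → Bool) :
    l.take (l.takeWhile p).length = l.takeWhile p := by
  induction l with
  | nil => simp
  | cons a t ih => by_cases h : p a <;> simp [h, ih]

theorem pvDrop_takeWhile {α : Type} (l : List α) (p : α → Bool) :
    l.drop (l.takeWhile p).length = l.dropWhile p := by
  induction l with
  | nil => simp
  | cons a t ih => by_cases h : p a <;> simp [h, ih]

theorem pvScanB_eq (ls : List String) (j : Nat) (hj : j ≤ ls.length) :
    pvScanB ls ls.length j = j + ((ls.drop j).takeWhile pvIsComment).length := by
  fun_induction pvScanB ls ls.length j with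
  | case1 j h ih =>
    obtain ⟨hlt, hcom⟩ := h
    rw [show pvIsCommentB = pvIsComment from rfl] at hcom
    rw [List.drop_eq_getElem_cons hlt]
    rw [List.getD_eq_getElem ls "" hlt] at hcom
    simp only [List.takeWhile_cons, hcom, if_true, List.length_cons]
    rw [ih hlt]
    omega
  | case2 j h =>
    rcases Decidable.em (j < ls.length) with hlt | hge
    · have hcom : pvIsComment (ls.getD j "") = false := by
        rcases Bool.eq_false_or_eq_true (pvIsComment (ls.getD j "")) with h' | h'
        · exact absurd ⟨hlt, h'⟩ h
        · exact h' 
      rw [List.drop_eq_getElem_cons hlt]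
      rw [List.getD_eq_getElem ls "" hlt] at hcom
      simp [hcom]
    · have : j = ls.length := by omega
      subst this
      simp

theorem pvLoopB_eq (ls : List String) (i : Nat) (hi : i ≤ ls.length) :
    pvLoopB ls ls.length i = pvSpec (ls.drop i) := by
  fun_induction pvLoopB ls ls.length i with
  | case1 i hlt hcom j _hj ih =>
    rw [show pvIsCommentB = pvIsComment from rfl] at hcom
    have hscan := pvScanB_eq ls (i + 1) (by omega)
    set t := ((ls.drop (i + 1)).takeWhile pvIsComment).length with ht
    have htle : t ≤ ls.length - (i + 1) := by
      have := (List.takeWhile_sublist (p := pvIsComment) (l := ls.drop (i + 1))).length_le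
      simp only [List.length_drop] at this
      omega
    have hj2 : j = i + 1 + t := hscan
    rw [ih (by omega)]
    rw [List.getD_eq_getElem ls "" hlt] at hcom
    rw [hj2]
    have hslice : PySem.List.slice ls (some (i : Int)) (some ((i + 1 + t : Nat) : Int))
        = ls[i] :: (ls.drop (i + 1)).takeWhile pvIsComment := by
      rw [show ((i + 1 + t : Nat) : Int) = ((i : Nat) : Int) + ((1 + t : Nat) : Int) from by
        push_cast; ring]
      rw [PySem.List.slice_natCast_add]
      rw [List.drop_eq_getElem_cons hlt, Nat.add_comm 1 t]
      rw [List.take_succ_cons, ht, pvTake_takeWhile]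
    rw [List.drop_eq_getElem_cons hlt, pvSpec]
    simp only [hcom, if_true]
    rw [hslice]
    have hdrop : ls.drop (i + 1 + t) = (ls.drop (i + 1)).dropWhile pvIsComment := by
      rw [← pvDrop_takeWhile (ls.drop (i + 1)) pvIsComment, List.drop_drop, ht]
    rw [hdrop]
  | case2 i hlt hcom ih =>
    rw [show pvIsCommentB = pvIsComment from rfl] at hcom
    rw [ih (by omega)]
    rw [List.getD_eq_getElem ls "" hlt] at hcom
    rw [List.drop_eq_getElem_cons hlt, pvSpec]
    simp [hcom]
  | case3 i h =>
    have : i = ls.length := by omega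
    subst this
    simp [pvSpec]

-- ===== VERDICT (by name: the statement is the Claim_ definition above) =====
theorem extract_comment_lines_py_spec : Claim_equal_extract_comment_lines_py := by
  intro content _
  show extract_comment_lines_py content = extract_comment_lines_py_alt content
  have h1 : extract_comment_lines_py content
      = pvFlush (((PySem.Str.splitlines content).map PySem.Str.strip).foldl pvStepS ([], [])) := by
    unfold extract_comment_lines_py
    rw [List.foldl_map]
    rfl
  have h2 : extract_comment_lines_py_alt content
      = pvSpec ((PySem.Str.splitlines content).map PySem.Str.strip) := by
    unfold extract_comment_lines_py_alt
    rw [pvLoopB_eq _ 0 (Nat.zero_le _)]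
    rw [List.drop_zero]
  rw [h1, h2, pvA_fold]
  simp
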